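-- pv_equiv track=rewrite | github.com/Pulkit3108/Codeforces-Problems | Round#607(Div. 2)B.py | solve
-- ===== SOURCE A (Python) =====
-- def solve(s, t):
--     mns = list(s)
--     for i in range(len(s)-2,-1,-1): mns[i] = min(mns[i], mns[i + 1])
--     for i in range(len(s)):
--         if s[i] != mns[i]:
--             j = max(j for j, v in enumerate(s[i:], i) if v == mns[i])
--             s = s[:i] + s[j] + s[i+1:j] + s[i] + s[j+1:]
--             break
--     return s if s < t else '---'
-- ===== SOURCE B (Python) =====
-- def solve(s, t):
--     n = len(s)
--     min_pos = n - 1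
--     cand = None
--     for i in range(n - 2, -1, -1):
--         if s[i] < s[min_pos]:
--             min_pos = i
--         elif s[i] > s[min_pos]:
--             cand = (i, min_pos)
--     if cand is not None:
--         i, j = cand
--         s = s[:i] + s[j] + s[i+1:j] + s[i] + s[j+1:]
--     return s if s < t else '---'
-- ===== Notes on version B (the rewrite author's own statement) =====
-- stated objective: faster
-- what changed: Replaces A's auxiliary suffix-min array, forward scan and inner rightmost-occurrence max-scan by a single right-to-left pass that maintains the rightmost-argmin index and overwrites a candidate swap pair.
import Mathlib
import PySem

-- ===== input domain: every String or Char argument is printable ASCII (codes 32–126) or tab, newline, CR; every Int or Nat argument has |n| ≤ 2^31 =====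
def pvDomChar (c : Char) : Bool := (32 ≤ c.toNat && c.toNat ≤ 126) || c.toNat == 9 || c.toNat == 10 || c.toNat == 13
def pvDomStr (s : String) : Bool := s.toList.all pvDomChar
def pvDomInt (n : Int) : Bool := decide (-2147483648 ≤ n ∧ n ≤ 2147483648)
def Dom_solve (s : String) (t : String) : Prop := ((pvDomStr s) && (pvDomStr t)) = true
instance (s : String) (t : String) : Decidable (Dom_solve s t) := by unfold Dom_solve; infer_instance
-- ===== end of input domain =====

-- B replaces A's suffix-min array + forward scan with inner rightmost-occurrence search by one
-- right-to-left pass keeping the rightmost-argmin index and the current candidate swap (faster).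

-- ===== PORT A =====
-- helper for A's 'j = max(j for j, v in enumerate(s[i:], i) if v == mns[i])'; the generator is
-- provably nonempty when this is reached (mns[i] occurs in s[i:]), so the .getD 0 default is unused
def jIdx (l : List Char) (i : Nat) (c : Char) : Int :=
  (PySem.List.max? (((PySem.List.enumerate (PySem.List.slice l (some (i : Int)) none) (i : Int)).filter
      (fun (p : Int × Char) => p.2 == c)).map (fun (p : Int × Char) => p.1)) (fun x => x)).getD 0

-- helper: A's 'for i in range(len(s)): if s[i] != mns[i]: … ; break' loop
def searchLoop (l mns : List Char) (i : Nat) : List Char :=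
  if _h : i < l.length then
    if l.getD i ' ' ≠ mns.getD i ' ' then
      PySem.List.slice l none (some (i : Int))
        ++ [PySem.List.pyGetD l (jIdx l i (mns.getD i ' ')) ' ']
        ++ PySem.List.slice l (some ((i : Int) + 1)) (some (jIdx l i (mns.getD i ' ')))
        ++ [PySem.List.pyGetD l (i : Int) ' ']
        ++ PySem.List.slice l (some (jIdx l i (mns.getD i ' ') + 1)) none
    else searchLoop l mns (i + 1)
  else l
termination_by l.length - i

def solve (s t : String) : String :=
  let l := s.toList
  let mns := (PySem.List.pyRange ((l.length : Int) - 2) (-1) (-1)).foldl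
      (fun m i => PySem.List.pySetD m i
        (min (PySem.List.pyGetD m i ' ') (PySem.List.pyGetD m (i + 1) ' '))) l
  let res := searchLoop l mns 0
  let s' := String.mk res
  if s' < t then s' else "---"

-- ===== PORT B =====
def solve_alt (s t : String) : String :=
  let l := s.toList
  let n := l.length
  let st := ((List.range (n - 1)).reverse).foldl
      (fun (st : Nat × Option (Nat × Nat)) i =>
        if l.getD i ' ' < l.getD st.1 ' ' then (i, st.2)
        else if l.getD st.1 ' ' < l.getD i ' ' then (st.1, some (i, st.1))
        else st)
      (n - 1, none)
  let res := match st.2 with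
    | none => l
    | some (i, j) => l.take i ++ [l.getD j ' '] ++ (l.drop (i + 1)).take (j - (i + 1))
        ++ [l.getD i ' '] ++ l.drop (j + 1)
  let s' := String.mk res
  if s' < t then s' else "---"

-- ===== PRECONDITION & SPEC =====
def Spec_solve (s : String) (t : String) (out : String) : Prop := out = solve_alt s t
instance (s : String) (t : String) (out : String) : Decidable (Spec_solve s t out) := by unfold Spec_solve; infer_instance

-- ===== CLAIM (what is proved, stated in full; the proofs are below) =====
def Claim_equal_solve : Prop := ∀ (s : String) (t : String), Dom_solve s t → Spec_solve s t (solve s t)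

-- ===== LEMMAS AND PROOFS =====

-- minimum character of a list (suffix minimum when applied to drops)
def sm : List Char → Char
  | [] => ' '
  | [c] => c
  | c :: d :: r => min c (sm (d :: r))

-- index of the rightmost minimum
def rma : List Char → Nat
  | [] => 0
  | [_] => 0
  | c :: d :: r => if c < sm (d :: r) then 0 else rma (d :: r) + 1

-- the suffix-min array A builds
def smArr : List Char → List Char
  | [] => []
  | c :: r => sm (c :: r) :: smArr r

-- the candidate pair B computes: least index whose char exceeds the strict suffix min,
-- paired with the rightmost argmin of the suffix from that index
def cnd : List Char → Option (Nat × Nat)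
  | [] => none
  | [_] => none
  | c :: d :: r =>
      if sm (d :: r) < c then some (0, rma (d :: r) + 1)
      else (cnd (d :: r)).map (fun p => (p.1 + 1, p.2 + 1))

lemma sm_cons (c : Char) (r : List Char) (h : r ≠ []) : sm (c :: r) = min c (sm r) := by
  cases r with
  | nil => simp at h
  | cons d r => rfl

lemma rma_cons (c : Char) (r : List Char) (h : r ≠ []) :
    rma (c :: r) = if c < sm r then 0 else rma r + 1 := by
  cases r with
  | nil => simp at h
  | cons d r => rfl

lemma cnd_cons (c : Char) (r : List Char) (h : r ≠ []) :
    cnd (c :: r) = if sm r < c then some (0, rma r + 1)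
      else (cnd r).map (fun p => (p.1 + 1, p.2 + 1)) := by
  cases r with
  | nil => simp at h
  | cons d r => rfl

lemma rma_lt_length (l : List Char) (h : l ≠ []) : rma l < l.length := by
  induction l with
  | nil => simp at h
  | cons c r ih =>
    cases r with
    | nil => simp [rma]
    | cons d r' =>
      rw [rma_cons c _ (by simp)]
      split
      · simp
      · have := ih (by simp); simpa using Nat.succ_lt_succ this

lemma getD_rma (l : List Char) (h : l ≠ []) (d : Char) : l.getD (rma l) d = sm l := by
  induction l with
  | nil => simp at h
  | cons c r ih =>
    cases r with
    | nil => simp [rma, sm]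
    | cons e r' =>
      rw [rma_cons c _ (by simp), sm_cons c _ (by simp)]
      by_cases hc : c < sm (e :: r')
      · simp [hc, min_eq_left (le_of_lt hc)]
      · simp only [hc]
        have : min c (sm (e :: r')) = sm (e :: r') := min_eq_right (le_of_not_gt hc)
        simpa [this] using ih (by simp)

lemma sm_le (l : List Char) (d : Char) : ∀ k < l.length, sm l ≤ l.getD k d := by
  induction l with
  | nil => simp
  | cons c r ih =>
    intro k hk
    cases r with
    | nil =>
      simp only [List.length_singleton] at hk
      interval_cases k
      simp [sm]
    | cons e r' =>
      rw [sm_cons c _ (by simp)]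
      cases k with
      | zero => simpa using min_le_left _ _
      | succ k =>
        have := ih k (by simpa using hk)
        simpa using le_trans (min_le_right _ _) this

lemma sm_lt_after_rma (l : List Char) (d : Char) :
    ∀ k, rma l < k → k < l.length → sm l < l.getD k d := by
  induction l with
  | nil => simp
  | cons c r ih =>
    intro k hk hlen
    cases r with
    | nil =>
      simp only [List.length_singleton] at hlen
      simp [rma] at hk
      omega
    | cons e r' =>
      rw [rma_cons c _ (by simp)] at hk
      rw [sm_cons c _ (by simp)]
      by_cases hc : c < sm (e :: r')
      · rw [if_pos hc] at hk
        cases k with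
        | zero => omega
        | succ k =>
          have h1 : min c (sm (e :: r')) = c := min_eq_left (le_of_lt hc)
          have h2 : sm (e :: r') ≤ (e :: r').getD k d := sm_le _ d k (by simpa using hlen)
          calc min c (sm (e :: r')) = c := h1
            _ < sm (e :: r') := hc
            _ ≤ (e :: r').getD k d := h2
      · rw [if_neg hc] at hk
        cases k with
        | zero => omega
        | succ k =>
          have := ih k (by omega) (by simpa using hlen)
          have h1 : min c (sm (e :: r')) = sm (e :: r') := min_eq_right (le_of_not_gt hc)
          rw [h1]; simpa using this

lemma getD_smArr (l : List Char) (k : Nat) (d : Char) (hk : k < l.length) :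
    (smArr l).getD k d = sm (l.drop k) := by
  induction l generalizing k with
  | nil => simp at hk
  | cons c r ih =>
    cases k with
    | zero => simp [smArr]
    | succ k => simpa [smArr] using ih k (by simpa using hk)

lemma getD_drop (l : List Char) (i j : Nat) (d : Char) :
    (l.drop i).getD j d = l.getD (i + j) d := by
  simp [List.getD_eq_getElem?_getD, List.getElem?_drop]

-- characterisation of cnd = none
lemma cnd_none (l : List Char) (h : cnd l = none) (d : Char) :
    ∀ k < l.length, l.getD k d = sm (l.drop k) := by
  induction l with
  | nil => simp
  | cons c r ih =>
    intro k hk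
    cases r with
    | nil =>
      simp only [List.length_singleton] at hk
      interval_cases k
      simp [sm]
    | cons e r' =>
      rw [cnd_cons c _ (by simp)] at h
      by_cases hb : sm (e :: r') < c
      · simp [hb] at h
      · rw [if_neg hb] at h
        have hr : cnd (e :: r') = none := by
          cases hcr : cnd (e :: r') <;> simp [hcr] at h ⊢
        cases k with
        | zero =>
          simp only [List.getD_cons_zero, List.drop_zero]
          rw [sm_cons c _ (by simp)]
          exact (min_eq_left (le_of_not_gt hb)).symm
        | succ k =>
          simpa using ih hr k (by simpa using hk)

-- characterisation of cnd = some
lemma cnd_some (l : List Char) (i j : Nat) (h : cnd l = some (i, j)) (d : Char) :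
    (∀ k < i, l.getD k d = sm (l.drop k)) ∧ i + 1 < l.length ∧
      sm (l.drop (i + 1)) < l.getD i d ∧ j = i + rma (l.drop i) := by
  induction l generalizing i j with
  | nil => simp [cnd] at h
  | cons c r ih =>
    cases r with
    | nil => simp [cnd] at h
    | cons e r' =>
      rw [cnd_cons c _ (by simp)] at h
      by_cases hb : sm (e :: r') < c
      · rw [if_pos hb] at h
        have hi : i = 0 := by simpa using congrArg (fun o => (o.map Prod.fst).getD 7) h.symm
        have hj : j = rma (e :: r') + 1 := by
          subst hi
          simpa using congrArg (fun o => (o.map Prod.snd).getD 7) h.symm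
        subst hi hj
        refine ⟨by omega, by simp, ?_, ?_⟩
        · simpa using hb
        · rw [List.drop_zero, rma_cons c _ (by simp), if_neg (by exact not_lt_of_gt hb)]
          omega
      · rw [if_neg hb] at h
        obtain ⟨⟨i', j'⟩, hcr, hpq⟩ := Option.map_eq_some_iff.mp h
        have hi : i = i' + 1 := by cases hpq; rfl
        have hj : j = j' + 1 := by cases hpq; rfl
        subst hi hj
        obtain ⟨g1, g2, g3, g4⟩ := ih i' j' hcr
        refine ⟨?_, by simpa using g2, by simpa using g3, by simpa using by omega⟩
        intro k hk
        cases k with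
        | zero =>
          simp only [List.getD_cons_zero, List.drop_zero]
          rw [sm_cons c _ (by simp)]
          exact (min_eq_left (le_of_not_gt hb)).symm
        | succ k => simpa using g1 k (by omega)

-- B's loop step
def altStep (l : List Char) (st : Nat × Option (Nat × Nat)) (i : Nat) : Nat × Option (Nat × Nat) :=
  if l.getD i ' ' < l.getD st.1 ' ' then (i, st.2)
  else if l.getD st.1 ' ' < l.getD i ' ' then (st.1, some (i, st.1))
  else st

def shiftO (k : Nat) (o : Option (Nat × Nat)) : Option (Nat × Nat) :=
  o.map (fun p => (p.1 + k, p.2 + k))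

lemma alt_loop_inv (l : List Char) (k : Nat) (hk : k < l.length) :
    ((List.range k).reverse).foldl (altStep l)
      (k + rma (l.drop k), shiftO k (cnd (l.drop k))) = (rma l, cnd l) := by
  induction k with
  | zero =>
    simp only [List.range_zero, List.reverse_nil, List.foldl_nil, List.drop_zero, Nat.zero_add]
    congr 1
    cases cnd l <;> simp [shiftO]
  | succ k ih =>
    have hk' : k < l.length := by omega
    have hr : l.drop (k + 1) ≠ [] := by
      intro h
      have := congrArg List.length h
      simp at this
      omega
    have hdk : l.drop k = l[k] :: l.drop (k + 1) := List.drop_eq_getElem_cons hk'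
    rw [show (List.range (k+1)).reverse = k :: (List.range k).reverse by simp [List.range_succ]]
    rw [List.foldl_cons]
    have hstep : altStep l (k + 1 + rma (l.drop (k + 1)), shiftO (k + 1) (cnd (l.drop (k + 1)))) k
        = (k + rma (l.drop k), shiftO k (cnd (l.drop k))) := by
      have hga : l.getD k ' ' = l[k] := by
        simp [List.getD_eq_getElem?_getD, List.getElem?_eq_getElem hk']
      have hgb : l.getD (k + 1 + rma (l.drop (k + 1))) ' ' = sm (l.drop (k + 1)) := by
        rw [show k + 1 + rma (l.drop (k + 1)) = (k + 1) + rma (l.drop (k + 1)) from rfl,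
          ← getD_drop l (k + 1) _ ' ', getD_rma _ hr]
      unfold altStep
      simp only [hga, hgb]
      by_cases h1 : l[k] < sm (l.drop (k + 1))
      · rw [if_pos h1]
        rw [hdk, rma_cons _ _ hr, if_pos h1, cnd_cons _ _ hr,
          if_neg (by exact not_lt_of_gt h1)]
        congr 1
        cases cnd (l.drop (k + 1)) <;> simp [shiftO] <;> omega
      · rw [if_neg h1]
        by_cases h2 : sm (l.drop (k + 1)) < l[k]
        · rw [if_pos h2]
          rw [hdk, rma_cons _ _ hr, if_neg h1, cnd_cons _ _ hr, if_pos h2]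
          simp [shiftO]
          omega
        · rw [if_neg h2]
          rw [hdk, rma_cons _ _ hr, if_neg h1, cnd_cons _ _ hr, if_neg h2]
          congr 1
          · omega
          · cases cnd (l.drop (k + 1)) <;> simp [shiftO] <;> omega
    rw [hstep, ih hk']

-- B's loop computes (rma l, cnd l)
lemma alt_loop_eq (l : List Char) (hl : l ≠ []) :
    ((List.range (l.length - 1)).reverse).foldl (altStep l)
      (l.length - 1, none) = (rma l, cnd l) := by
  have hn : 0 < l.length := List.length_pos_iff.mpr hl
  have hd : l.drop (l.length - 1) = [l[l.length - 1]] := by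
    rw [List.drop_eq_getElem_cons (by omega)]
    congr 1
    apply List.eq_nil_of_length_eq_zero
    simp
    omega
  have := alt_loop_inv l (l.length - 1) (by omega)
  rw [hd] at this
  simpa [rma, cnd, shiftO] using this

-- A's step, after casts are removed
def mnsStep (m : List Char) (k : Nat) : List Char :=
  m.set k (min (m.getD k ' ') (m.getD (k + 1) ' '))

lemma smArr_singleton (c : Char) : smArr [c] = [c] := by simp [smArr, sm]

lemma mns_hstep (l : List Char) (k : Nat) (hk : k + 1 < l.length) :
    mnsStep (l.take (k + 1) ++ smArr (l.drop (k + 1))) k = l.take k ++ smArr (l.drop k) := by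
  have hk' : k < l.length := by omega
  have hr : l.drop (k + 1) ≠ [] := by
    intro h
    have := congrArg List.length h
    simp at this
    omega
  have hdk : l.drop k = l[k] :: l.drop (k + 1) := List.drop_eq_getElem_cons hk'
  have htk : l.take (k + 1) = l.take k ++ [l[k]] := by
    rw [List.take_succ]
    simp [List.getElem?_eq_getElem hk']
  have hlen : (l.take k).length = k := List.length_take_of_le (by omega)
  unfold mnsStep
  rw [htk, List.append_assoc]
  have hga : (l.take k ++ ([l[k]] ++ smArr (l.drop (k + 1)))).getD k ' ' = l[k] := by
    rw [List.getD_eq_getElem?_getD, List.getElem?_append_right (by omega)]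
    simp [hlen]
  have hsm : smArr (l.drop (k + 1)) = sm (l.drop (k + 1)) :: (smArr (l.drop (k+1))).tail := by
    cases hc : l.drop (k + 1) with
    | nil => exact absurd hc hr
    | cons a r => simp [smArr]
  have hgb : (l.take k ++ ([l[k]] ++ smArr (l.drop (k + 1)))).getD (k + 1) ' '
      = sm (l.drop (k + 1)) := by
    rw [List.getD_eq_getElem?_getD, List.getElem?_append_right (by omega)]
    rw [hsm]
    simp [hlen]
  rw [hga, hgb]
  rw [List.set_append_right _ _ (by omega)]
  simp only [hlen, Nat.sub_self]
  have hmin : sm (l.drop k) = min l[k] (sm (l.drop (k + 1))) := by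
    rw [hdk, sm_cons _ _ hr]
  have hsa : smArr (l.drop k) = sm (l.drop k) :: smArr (l.drop (k + 1)) := by
    rw [hdk]; rfl
  rw [hsa, hmin]
  rfl

lemma mns_inv (l : List Char) (k : Nat) (hk : k < l.length) :
    (PySem.List.pyRange ((k : Int) - 1) (-1) (-1)).foldl
      (fun m i => PySem.List.pySetD m i
        (min (PySem.List.pyGetD m i ' ') (PySem.List.pyGetD m (i + 1) ' ')))
      (l.take k ++ smArr (l.drop k)) = smArr l := by
  induction k with
  | zero =>
    rw [PySem.List.pyRange_neg_one_eq_nil (by omega)]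
    simp
  | succ k ih =>
    rw [show ((k + 1 : Nat) : Int) - 1 = (k : Int) by push_cast; ring,
      PySem.List.pyRange_neg_one_cons (by omega), List.foldl_cons]
    set m0 := l.take (k + 1) ++ smArr (l.drop (k + 1)) with hm0
    have h2 : PySem.List.pyGetD m0 ((k : Int) + 1) ' ' = m0.getD (k + 1) ' ' := by
      rw [show ((k : Int) + 1) = ((k + 1 : Nat) : Int) by push_cast; ring]
      rw [PySem.List.pyGetD_natCast]
    have hconv : PySem.List.pySetD m0 (k : Int)
        (min (PySem.List.pyGetD m0 (k : Int) ' ') (PySem.List.pyGetD m0 ((k : Int) + 1) ' '))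
        = mnsStep m0 k := by
      rw [h2]
      simp [mnsStep, List.getD_eq_getElem?_getD]
    rw [hconv, hm0, mns_hstep l k hk]
    exact ih (by omega)

-- A's mns fold builds smArr
lemma mns_eq_smArr (l : List Char) :
    (PySem.List.pyRange ((l.length : Int) - 2) (-1) (-1)).foldl
      (fun m i => PySem.List.pySetD m i
        (min (PySem.List.pyGetD m i ' ') (PySem.List.pyGetD m (i + 1) ' '))) l = smArr l := by
  cases hc : l with
  | nil =>
    rw [PySem.List.pyRange_neg_one_eq_nil (by simp)]
    simp [smArr]
  | cons a r =>
    rw [← hc]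
    have hn : 0 < l.length := by rw [hc]; simp
    have hd : l.drop (l.length - 1) = [l[l.length - 1]] := by
      rw [List.drop_eq_getElem_cons (by omega)]
      congr 1
      apply List.eq_nil_of_length_eq_zero
      simp
      omega
    have hstart : l.take (l.length - 1) ++ smArr (l.drop (l.length - 1)) = l := by
      rw [hd, smArr_singleton, ← hd, List.take_append_drop]
    have := mns_inv l (l.length - 1) (by omega)
    rw [hstart] at this
    rw [show (l.length : Int) - 2 = ((l.length - 1 : Nat) : Int) - 1 by omega]
    exact this

-- the value A computes as j, at a bad position
lemma maxIdx (l : List Char) (i : Nat) (hi : i < l.length) :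
    jIdx l i (sm (l.drop i)) = ((i + rma (l.drop i) : Nat) : Int) := by
  unfold jIdx
  rw [PySem.List.slice_from_natCast]
  set c := sm (l.drop i) with hc
  set L := ((PySem.List.enumerate (l.drop i) (i : Int)).filter
      (fun (p : Int × Char) => p.2 == c)).map (fun (p : Int × Char) => p.1) with hL
  have hdne : l.drop i ≠ [] := by
    intro h
    have := congrArg List.length h
    simp at this
    omega
  have hrl : rma (l.drop i) < (l.drop i).length := rma_lt_length _ hdne
  have hget : (l.drop i)[rma (l.drop i)] = c := by
    have := getD_rma (l.drop i) hdne ' '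
    rwa [List.getD_eq_getElem?_getD, List.getElem?_eq_getElem hrl] at this
  have hmem : ((i + rma (l.drop i) : Nat) : Int) ∈ L := by
    rw [hL]
    apply List.mem_map.mpr
    refine ⟨((i : Int) + rma (l.drop i), (l.drop i)[rma (l.drop i)]), ?_, by push_cast; ring⟩
    rw [List.mem_filter]
    constructor
    · exact (PySem.List.mem_enumerate_iff _ _ _).mpr ⟨rma (l.drop i), hrl, rfl⟩
    · simp [hget]
  have hbound : ∀ x ∈ L, x ≤ ((i + rma (l.drop i) : Nat) : Int) := by
    intro x hx
    rw [hL] at hx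
    obtain ⟨p, hp, hpx⟩ := List.mem_map.mp hx
    rw [List.mem_filter] at hp
    obtain ⟨hpe, hpc⟩ := hp
    obtain ⟨k, hk, hpk⟩ := (PySem.List.mem_enumerate_iff _ _ _).mp hpe
    have hval : (l.drop i)[k] = c := by
      have : p.2 = (l.drop i)[k] := by rw [hpk]
      rw [← this]
      exact beq_iff_eq.mp hpc
    have hkr : k ≤ rma (l.drop i) := by
      by_contra hgt
      have := sm_lt_after_rma (l.drop i) ' ' k (by omega) hk
      rw [List.getD_eq_getElem?_getD, List.getElem?_eq_getElem hk] at this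
      rw [hval] at this
      exact absurd this (lt_irrefl _)
    have : x = (i : Int) + k := by rw [← hpx, hpk]
    rw [this]
    push_cast
    omega
  have hne : L ≠ [] := by
    intro h
    rw [h] at hmem
    simp at hmem
  obtain ⟨m, hm⟩ := Option.ne_none_iff_exists'.mp
    (fun h => hne ((PySem.List.max?_eq_none_iff L (fun x : Int => x)).mp h))
  rw [hm]
  simp only [Option.getD_some]
  have h1 : m ≤ ((i + rma (l.drop i) : Nat) : Int) := hbound m (PySem.List.max?_mem hm)
  have h2 : ((i + rma (l.drop i) : Nat) : Int) ≤ m := PySem.List.max?_isMax hm _ hmem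
  omega

lemma searchLoop_good_step (l : List Char) (i : Nat) (hi : i < l.length)
    (hgood : l.getD i ' ' = sm (l.drop i)) :
    searchLoop l (smArr l) i = searchLoop l (smArr l) (i + 1) := by
  rw [searchLoop]
  rw [dif_pos hi]
  rw [if_neg (by rw [getD_smArr l i ' ' hi, hgood]; simp)]

lemma searchLoop_bad (l : List Char) (i : Nat) (hi1 : i + 1 < l.length)
    (hbad : sm (l.drop (i + 1)) < l.getD i ' ') :
    searchLoop l (smArr l) i
      = l.take i ++ [l.getD (i + rma (l.drop i)) ' ']
        ++ (l.drop (i + 1)).take ((i + rma (l.drop i)) - (i + 1))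
        ++ [l.getD i ' '] ++ l.drop (i + rma (l.drop i) + 1) := by
  have hi : i < l.length := by omega
  have hdne : l.drop (i + 1) ≠ [] := by
    intro h
    have := congrArg List.length h
    simp at this
    omega
  have hgi : l.getD i ' ' = l[i] := by
    simp [List.getD_eq_getElem?_getD, List.getElem?_eq_getElem hi]
  have hdk : l.drop i = l.getD i ' ' :: l.drop (i + 1) := by
    rw [hgi]
    exact List.drop_eq_getElem_cons hi
  have hsmi : sm (l.drop i) = sm (l.drop (i + 1)) := by
    rw [hdk, sm_cons _ _ hdne]
    exact min_eq_right (le_of_lt hbad)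
  have hne : l.getD i ' ' ≠ sm (l.drop i) := by
    rw [hsmi]
    exact ne_of_gt hbad
  rw [searchLoop]
  rw [dif_pos hi]
  rw [if_pos (by rw [getD_smArr l i ' ' hi]; exact hne)]
  rw [getD_smArr l i ' ' hi]
  rw [maxIdx l i hi]
  set j := i + rma (l.drop i) with hj
  have hslice1 : PySem.List.slice l none (some (i : Int)) = l.take i :=
    PySem.List.slice_to_natCast ..
  have hg1 : PySem.List.pyGetD l ((j : Nat) : Int) ' ' = l.getD j ' ' := by
    rw [PySem.List.pyGetD_natCast]
  have hg2 : PySem.List.pyGetD l ((i : Nat) : Int) ' ' = l.getD i ' ' := by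
    rw [PySem.List.pyGetD_natCast]
  have hslice2 : PySem.List.slice l (some ((i : Int) + 1)) (some ((j : Nat) : Int))
      = (l.drop (i + 1)).take (j - (i + 1)) := by
    rw [show ((i : Int) + 1) = ((i + 1 : Nat) : Int) by push_cast; ring]
    rw [PySem.List.slice_natCast]
  have hslice3 : PySem.List.slice l (some (((j : Nat) : Int) + 1)) none = l.drop (j + 1) := by
    rw [show (((j : Nat) : Int) + 1) = ((j + 1 : Nat) : Int) by push_cast; ring]
    rw [PySem.List.slice_from_natCast]
  rw [hslice1, hg1, hslice2, hg2, hslice3]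

-- A's search loop agrees with B's candidate
lemma searchLoop_eq (l : List Char) :
    searchLoop l (smArr l) 0 = (match cnd l with
      | none => l
      | some (i, j) => l.take i ++ [l.getD j ' '] ++ (l.drop (i + 1)).take (j - (i + 1))
          ++ [l.getD i ' '] ++ l.drop (j + 1)) := by
  cases hc : cnd l with
  | none =>
    have hgood := cnd_none l hc ' '
    have key : ∀ d i, l.length - i = d → searchLoop l (smArr l) i = l := by
      intro d
      induction d with
      | zero =>
        intro i hd
        rw [searchLoop]
        rw [dif_neg (by omega)]
      | succ d ih =>
        intro i hd
        have hi : i < l.length := by omega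
        rw [searchLoop_good_step l i hi (hgood i hi)]
        exact ih (i + 1) (by omega)
    simpa using key (l.length - 0) 0 rfl
  | some p =>
    obtain ⟨i, j⟩ := p
    obtain ⟨hgood, hi1, hbad, hj⟩ := cnd_some l i j hc ' '
    have key : ∀ d a, a ≤ i → i - a = d → searchLoop l (smArr l) a
        = l.take i ++ [l.getD j ' '] ++ (l.drop (i + 1)).take (j - (i + 1))
          ++ [l.getD i ' '] ++ l.drop (j + 1) := by
      intro d
      induction d with
      | zero =>
        intro a ha hd
        have : a = i := by omega
        subst this
        rw [searchLoop_bad l a hi1 hbad, hj]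
      | succ d ih =>
        intro a ha hd
        have hai : a < i := by omega
        rw [searchLoop_good_step l a (by omega) (hgood a hai)]
        exact ih (a + 1) (by omega) (by omega)
    exact key i 0 (by omega) (by omega)

-- ===== VERDICT (by name: the statement is the Claim_ definition above) =====
theorem solve_spec : Claim_equal_solve := by
  intro s t _
  unfold Spec_solve
  simp only [solve, solve_alt]
  rw [mns_eq_smArr, searchLoop_eq]
  cases hl : s.toList with
  | nil =>
    simp [cnd]
  | cons a r =>
    rw [← hl]
    have hne : s.toList ≠ [] := by rw [hl]; simp
    rw [show (((List.range (s.toList.length - 1)).reverse).foldl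
        (fun (st : Nat × Option (Nat × Nat)) i =>
          if s.toList.getD i ' ' < s.toList.getD st.1 ' ' then (i, st.2)
          else if s.toList.getD st.1 ' ' < s.toList.getD i ' ' then (st.1, some (i, st.1))
          else st)
        (s.toList.length - 1, none))
      = (rma s.toList, cnd s.toList) from alt_loop_eq s.toList hne]
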